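-- pv_equiv track=rewrite | github.com/gamesh411/codechecker | import_rewriter.py | transform_import_path
-- ===== SOURCE A (Python) =====
-- from typing import Dict, List, Set, Tuple, Optional
--
-- MODULE_MAPPING = {
--     # Main modules
--     "codechecker_common": "codechecker_common",
--     "codechecker_analyzer": "analyzer.codechecker_analyzer",
--     "codechecker_web": "web.codechecker_web",
--     "codechecker_server": "web.server.codechecker_server",
--     "codechecker_client": "web.client.codechecker_client",
--
--     # Tool modules
--     "codechecker_report_converter": "tools.report_converter.codechecker_report_converter",
--     "codechecker_merge_clang_extdef_mappings": "analyzer.tools.merge_clang_extdef_mappings.codechecker_merge_clang_extdef_mappings",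
--     "codechecker_statistics_collector": "analyzer.tools.statistics_collector.codechecker_statistics_collector",
--     "tu_collector": "tools.tu_collector.tu_collector",
--     "bazel_compile_commands": "tools.bazel.bazel_compile_commands",
-- }
--
-- def transform_import_path(original_import: str) -> Optional[str]:
--     """
--     Transform an import path to use repository root-based absolute imports.
--     Returns None if no transformation is needed.
--     """
--     # Check if this import uses any of our modules
--     for module, new_path in MODULE_MAPPING.items():
--         # Full module import (e.g., "import codechecker_common")
--         if original_import == module:
--             return new_path
--
--         # Module as prefix (e.g., "from codechecker_common.logger import get_logger")
--         if original_import.startswith(f"{module}."):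
--             suffix = original_import[len(module):]
--             return f"{new_path}{suffix}"
--
--     # No transformation needed
--     return None
-- ===== SOURCE B (Python) =====
-- MODULE_MAPPING = {
--     "codechecker_common": "codechecker_common",
--     "codechecker_analyzer": "analyzer.codechecker_analyzer",
--     "codechecker_web": "web.codechecker_web",
--     "codechecker_server": "web.server.codechecker_server",
--     "codechecker_client": "web.client.codechecker_client",
--     "codechecker_report_converter": "tools.report_converter.codechecker_report_converter",
--     "codechecker_merge_clang_extdef_mappings": "analyzer.tools.merge_clang_extdef_mappings.codechecker_merge_clang_extdef_mappings",
--     "codechecker_statistics_collector": "analyzer.tools.statistics_collector.codechecker_statistics_collector",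
--     "tu_collector": "tools.tu_collector.tu_collector",
--     "bazel_compile_commands": "tools.bazel.bazel_compile_commands",
-- }
--
-- def transform_import_path(original_import):
--     """
--     Transform an import path to use repository root-based absolute imports.
--     Returns None if no transformation is needed.
--     """
--     # The mapping keys contain no '.', so only the first dotted component
--     # of the import can match: look it up directly instead of scanning.
--     head = original_import.split('.', 1)[0]
--     new_path = MODULE_MAPPING.get(head)
--     if new_path is None:
--         return None
--     return new_path + original_import[len(head):]
-- ===== Notes on version B (the rewrite author's own statement) =====
-- stated objective: simpler
-- what changed: Replaces the loop over all mapping entries (with an equality and a prefix test per entry) by a single dict lookup of the import's first dotted component, which is sound because the mapping keys are single undotted components.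
import Mathlib
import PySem

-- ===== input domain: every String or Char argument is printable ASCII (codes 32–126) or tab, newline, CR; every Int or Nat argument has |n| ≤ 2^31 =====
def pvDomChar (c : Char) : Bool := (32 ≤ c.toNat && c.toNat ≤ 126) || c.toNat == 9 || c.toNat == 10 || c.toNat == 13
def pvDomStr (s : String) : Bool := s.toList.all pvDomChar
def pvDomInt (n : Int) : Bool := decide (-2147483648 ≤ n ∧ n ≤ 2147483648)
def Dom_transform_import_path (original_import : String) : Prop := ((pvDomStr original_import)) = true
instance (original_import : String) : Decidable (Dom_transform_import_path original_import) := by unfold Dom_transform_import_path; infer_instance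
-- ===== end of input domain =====

-- B replaces A's scan over all mapping entries by one dict lookup of the import's
-- first dotted component (sound because the mapping keys contain no '.'); objective: simpler.

-- the module-level constant MODULE_MAPPING (shared by A and B), as character lists
def pvModuleMapping : List (List Char × List Char) :=
  [ ("codechecker_common".toList, "codechecker_common".toList),
    ("codechecker_analyzer".toList, "analyzer.codechecker_analyzer".toList),
    ("codechecker_web".toList, "web.codechecker_web".toList),
    ("codechecker_server".toList, "web.server.codechecker_server".toList),
    ("codechecker_client".toList, "web.client.codechecker_client".toList),
    ("codechecker_report_converter".toList, "tools.report_converter.codechecker_report_converter".toList),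
    ("codechecker_merge_clang_extdef_mappings".toList, "analyzer.tools.merge_clang_extdef_mappings.codechecker_merge_clang_extdef_mappings".toList),
    ("codechecker_statistics_collector".toList, "analyzer.tools.statistics_collector.codechecker_statistics_collector".toList),
    ("tu_collector".toList, "tools.tu_collector.tu_collector".toList),
    ("bazel_compile_commands".toList, "tools.bazel.bazel_compile_commands".toList) ]

-- ===== PORT A =====
-- the 'for module, new_path in MODULE_MAPPING.items()' loop, entry by entry
def pvALoop (s : List Char) : List (List Char × List Char) → Option (List Char)
  | [] => none
  | (module, new_path) :: rest =>
    if s = module then some new_path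
    else if PySem.Chars.startswith s (module ++ ['.']) then
      -- suffix = original_import[len(module):]
      some (new_path ++ PySem.Chars.slice s (some (module.length : Int)) none)
    else pvALoop s rest

def transform_import_path (original_import : String) : Option String :=
  (pvALoop original_import.toList pvModuleMapping).map String.ofList

-- ===== PORT B =====
def transform_import_path_alt (original_import : String) : Option String :=
  let s := original_import.toList
  -- hand port of original_import.split('.', 1)[0]: the characters before the first '.'
  -- (exact: Python's str.split with sep '.' and maxsplit 1 cuts at the first '.')
  let head := s.takeWhile (· != '.')
  match PySem.Dict.get? (PySem.Dict.mk pvModuleMapping) head with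
  | none => none
  | some new_path =>
    some (String.ofList (new_path ++ PySem.Chars.slice s (some (head.length : Int)) none))

-- ===== PRECONDITION & SPEC =====
def Spec_transform_import_path (original_import : String) (out : Option String) : Prop := out = transform_import_path_alt original_import
instance (original_import : String) (out : Option String) : Decidable (Spec_transform_import_path original_import out) := by unfold Spec_transform_import_path; infer_instance

-- ===== CLAIM (what is proved, stated in full; the proofs are below) =====
def Claim_equal_transform_import_path : Prop := ∀ (original_import : String), Dom_transform_import_path original_import → Spec_transform_import_path original_import (transform_import_path original_import)

-- ===== LEMMAS AND PROOFS =====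

-- the first element dropped-to by dropWhile fails the predicate (no named Mathlib lemma in this form)
lemma pv_dropWhile_head_false {α : Type} (p : α → Bool) (l : List α) (c : α) (t : List α)
    (h : l.dropWhile p = c :: t) : p c = false := by
  have hne : l.dropWhile p ≠ [] := by simp [h]
  have h1 := List.head_dropWhile_not p hne
  revert h1
  revert hne
  rw [h]
  intro hne h1
  simpa using h1

-- For a key with no '.', A's two tests (equality / dotted-prefix) fire exactly when
-- the part of s before its first '.' equals the key.
lemma pv_cond_iff (m s : List Char) (hm : ('.' : Char) ∉ m) :
    (s = m ∨ (m ++ ['.']) <+: s) ↔ s.takeWhile (· != '.') = m := by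
  constructor
  · rintro (rfl | ⟨t, rfl⟩)
    · rw [List.takeWhile_eq_self_iff]
      intro a ha
      rw [bne_iff_ne]
      intro he
      rw [he] at ha
      exact hm ha
    · rw [List.append_assoc, List.singleton_append, List.takeWhile_append]
      have hall : (m.takeWhile (· != '.')) = m := by
        rw [List.takeWhile_eq_self_iff]
        intro a ha
        rw [bne_iff_ne]
        intro he
        rw [he] at ha
        exact hm ha
      rw [hall]
      simp
  · intro h
    have hs := List.takeWhile_append_dropWhile (p := fun c => c != '.') (l := s)
    cases hd : s.dropWhile (fun c => c != '.') with
    | nil =>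
      left
      rw [← hs, hd, List.append_nil, h]
    | cons c t =>
      right
      have hc : c = '.' := by
        have h1 := pv_dropWhile_head_false (fun c => c != '.') s c t hd
        simpa using h1
      refine ⟨t, ?_⟩
      rw [List.append_assoc, List.singleton_append, ← hc, ← h, ← hd, hs]

-- A's loop over any entry list whose keys contain no '.' equals the head-component lookup.
lemma pv_loop_eq (s : List Char) (L : List (List Char × List Char))
    (h : ∀ q ∈ L, ('.' : Char) ∉ q.1) :
    pvALoop s L =
      (PySem.Dict.get? (PySem.Dict.mk L) (s.takeWhile (· != '.'))).map
        (fun p => p ++ PySem.Chars.slice s (some ((s.takeWhile (· != '.')).length : Int)) none) := by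
  induction L with
  | nil => simp [pvALoop, PySem.Dict.get?]
  | cons q rest ih =>
    obtain ⟨m, p⟩ := q
    have hm : ('.' : Char) ∉ m := h (m, p) (by simp)
    by_cases hhead : s.takeWhile (· != '.') = m
    · have hcond : s = m ∨ (m ++ ['.']) <+: s := (pv_cond_iff m s hm).2 hhead
      have hfind : PySem.Dict.get? (PySem.Dict.mk ((m, p) :: rest)) (s.takeWhile (· != '.')) = some p := by
        simp [PySem.Dict.get?, List.find?, hhead]
      rw [hfind]
      rcases hcond with rfl | hpre
      · -- exact match: the suffix slice is empty
        have : s.takeWhile (· != '.') = s := hhead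
        rw [pvALoop]
        simp only [reduceIte]
        rw [hhead, PySem.Chars.slice_eq_listSlice,
            PySem.List.slice_from s (a := (s.length : Int)) (by positivity)]
        simp
      · rw [pvALoop]
        by_cases hseq : s = m
        · simp only [if_pos hseq]
          subst hseq
          rw [hhead, PySem.Chars.slice_eq_listSlice,
              PySem.List.slice_from s (a := (s.length : Int)) (by positivity)]
          simp
        · have hsw : PySem.Chars.startswith s (m ++ ['.']) = true := by
            rw [PySem.Chars.startswith_iff]; exact hpre
          simp only [if_neg hseq, if_pos hsw, hhead, Option.map_some]
    · have hcondn : ¬ (s = m ∨ (m ++ ['.']) <+: s) := fun hc => hhead ((pv_cond_iff m s hm).1 hc)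
      rw [not_or] at hcondn
      have hsw : PySem.Chars.startswith s (m ++ ['.']) = false := by
        rw [Bool.eq_false_iff]
        intro hh
        exact hcondn.2 ((PySem.Chars.startswith_iff s (m ++ ['.'])).1 hh)
      rw [pvALoop]
      simp only [if_neg hcondn.1, hsw, if_neg (Bool.false_ne_true)]
      rw [ih (fun q hq => h q (by simp [hq]))]
      have hbeq : (m == s.takeWhile (· != '.')) = false := by
        rw [beq_eq_false_iff_ne]
        exact fun he => hhead he.symm
      have hfind : PySem.Dict.get? (PySem.Dict.mk ((m, p) :: rest)) (s.takeWhile (· != '.')) =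
          PySem.Dict.get? (PySem.Dict.mk rest) (s.takeWhile (· != '.')) := by
        simp [PySem.Dict.get?, List.find?, hbeq]
      rw [hfind]

-- ===== VERDICT (by name: the statement is the Claim_ definition above) =====
theorem transform_import_path_spec : Claim_equal_transform_import_path := by
  intro s _
  unfold Spec_transform_import_path transform_import_path transform_import_path_alt
  have hkeys : ∀ q ∈ pvModuleMapping, ('.' : Char) ∉ q.1 := by decide
  rw [pv_loop_eq s.toList pvModuleMapping hkeys]
  cases hg : PySem.Dict.get? (PySem.Dict.mk pvModuleMapping) (s.toList.takeWhile (· != '.')) <;>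
    simp [hg]
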